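-- pv_equiv track=rewrite | github.com/MattVerwey/TopDeck | src/topdeck/reporting/service.py | _generate_error_summary
-- ===== SOURCE A (Python) =====
-- from typing import Any
--
-- def _generate_error_summary(errors: list[dict[str, Any]]) -> str:
--     """Generate error summary text."""
--     if not errors:
--         return "No errors found in the specified time range."
--
--     severity_counts: dict[str, int] = {}
--     for error in errors:
--         severity = error.get("severity", "unknown")
--         severity_counts[severity] = severity_counts.get(severity, 0) + 1
--
--     summary = f"**Total Errors**: {len(errors)}\n\n"
--     summary += "**By Severity**:\n"
--     for severity, count in sorted(severity_counts.items()):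
--         summary += f"- {severity.title()}: {count}\n"
--
--     return summary
-- ===== SOURCE B (Python) =====
-- def _generate_error_summary(errors: list[dict[str, "Any"]]) -> str:
--     """Generate error summary text (sort all severities, then one run-length scan)."""
--     if not errors:
--         return "No errors found in the specified time range."
--
--     sevs = sorted(error.get("severity", "unknown") for error in errors)
--     lines = ""
--     while sevs:
--         head = sevs[0]
--         k = 1
--         while k < len(sevs) and sevs[k] == head:
--             k += 1
--         lines += f"- {head.title()}: {k}\n"
--         sevs = sevs[k:]
--     return f"**Total Errors**: {len(errors)}\n\n**By Severity**:\n{lines}"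
-- ===== Notes on version B (the rewrite author's own statement) =====
-- stated objective: alternative
-- what changed: Instead of A's incrementally built severity->count dict followed by sorted(items()), B sorts the full list of severities once and emits each '- Severity: count' line from a single run-length scan over that sorted list (equal severities form contiguous runs), so no dictionary or per-key counting exists at all.
import Mathlib
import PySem

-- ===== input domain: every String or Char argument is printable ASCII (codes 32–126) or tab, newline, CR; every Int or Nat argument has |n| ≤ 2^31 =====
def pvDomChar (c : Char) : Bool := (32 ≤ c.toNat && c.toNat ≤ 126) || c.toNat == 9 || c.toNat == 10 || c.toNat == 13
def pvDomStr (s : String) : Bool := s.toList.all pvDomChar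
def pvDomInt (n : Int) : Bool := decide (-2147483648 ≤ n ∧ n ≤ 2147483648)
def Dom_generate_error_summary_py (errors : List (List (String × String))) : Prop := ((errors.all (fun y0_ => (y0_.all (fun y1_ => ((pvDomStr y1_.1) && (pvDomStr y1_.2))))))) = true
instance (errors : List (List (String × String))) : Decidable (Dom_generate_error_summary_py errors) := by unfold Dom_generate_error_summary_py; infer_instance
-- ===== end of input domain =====

-- B sorts the full severity list once and emits the lines by a single run-length
-- scan over the sorted list, instead of A's counting dict + sorted(items()).

-- str.title(), exact on ASCII: a letter is uppercased when the previous character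
-- is not a letter, lowercased otherwise; non-letters pass through and reset.
def pvTitleAux : Bool → List Char → List Char
  | _, [] => []
  | prev, c :: rest =>
    if PySem.Chars.isalpha c then
      (if prev then PySem.Chars.lowerChar c else PySem.Chars.upperChar c) :: pvTitleAux true rest
    else c :: pvTitleAux false rest

def pvTitle (s : String) : String := String.ofList (pvTitleAux false s.toList)

-- ===== PORT A =====
def generate_error_summary_py (errors : List (List (String × String))) : String :=
  if errors = [] then "No errors found in the specified time range."
  else
    let severity_counts : PySem.Dict String Int :=
      errors.foldl (fun d error =>
        let severity := (PySem.Dict.mk error).getD "severity" "unknown"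
        d.insert severity (d.getD severity 0 + 1)) PySem.Dict.empty
    let summary := "**Total Errors**: " ++ PySem.Int.toStr (errors.length : Int) ++ "\n\n"
    let summary := summary ++ "**By Severity**:\n"
    (PySem.List.sorted2 severity_counts.items (fun p => p.1) (fun p => p.2)).foldl
      (fun s p => s ++ "- " ++ pvTitle p.1 ++ ": " ++ PySem.Int.toStr p.2 ++ "\n") summary

-- ===== PORT B =====
-- the 'while sevs:' loop of Source B: the inner 'while' finds the run length k of the
-- head (k = 1 + length of the leading run in the tail), one line is emitted, and
-- sevs = sevs[k:] drops the run.
def pvRunLines : List String → String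
  | [] => ""
  | x :: rest =>
    let k := 1 + (rest.takeWhile (fun y => y == x)).length
    "- " ++ pvTitle x ++ ": " ++ PySem.Int.toStr (k : Int) ++ "\n"
      ++ pvRunLines (rest.dropWhile (fun y => y == x))
termination_by l => l.length
decreasing_by
  simpa using Nat.lt_succ_of_le (List.length_dropWhile_le _ _)

def generate_error_summary_py_alt (errors : List (List (String × String))) : String :=
  if errors = [] then "No errors found in the specified time range."
  else
    let sevs := PySem.List.sorted
      (errors.map (fun error => (PySem.Dict.mk error).getD "severity" "unknown")) (fun x => x)
    let lines := pvRunLines sevs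
    "**Total Errors**: " ++ PySem.Int.toStr (errors.length : Int) ++ "\n\n"
      ++ "**By Severity**:\n" ++ lines

-- ===== PRECONDITION & SPEC =====
def Spec_generate_error_summary_py (errors : List (List (String × String))) (out : String) : Prop := out = generate_error_summary_py_alt errors
instance (errors : List (List (String × String))) (out : String) : Decidable (Spec_generate_error_summary_py errors out) := by unfold Spec_generate_error_summary_py; infer_instance

-- ===== CLAIM (what is proved, stated in full; the proofs are below) =====
def Claim_equal_generate_error_summary_py : Prop := ∀ (errors : List (List (String × String))), Dom_generate_error_summary_py errors → Spec_generate_error_summary_py errors (generate_error_summary_py errors)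

-- ===== LEMMAS AND PROOFS =====

-- the run heads of a list, in order (proof-side characterisation of pvRunLines)
def pvKeys : List String → List String
  | [] => []
  | x :: rest => x :: pvKeys (rest.dropWhile (fun y => y == x))
termination_by l => l.length
decreasing_by
  simpa using Nat.lt_succ_of_le (List.length_dropWhile_le _ _)

theorem pv_insertBy_congr {α : Type} (b₁ b₂ : α → α → Bool) (x : α) (ys : List α)
    (h : ∀ y ∈ ys, b₁ x y = b₂ x y) :
    PySem.List.insertBy b₁ x ys = PySem.List.insertBy b₂ x ys := by
  induction ys with
  | nil => rfl
  | cons y ys ih =>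
    simp only [PySem.List.insertBy]
    rw [h y (by simp)]
    split_ifs with hb
    · rfl
    · rw [ih (fun z hz => h z (by simp [hz]))]

theorem pv_foldl_insertBy_congr {α : Type} (b₁ b₂ : α → α → Bool) (S : α → Prop)
    (hb : ∀ a c, S a → S c → b₁ a c = b₂ a c) :
    ∀ (xs : List α) (acc : List α), (∀ x ∈ xs, S x) → (∀ y ∈ acc, S y) →
    xs.foldl (fun acc x => PySem.List.insertBy b₁ x acc) acc
      = xs.foldl (fun acc x => PySem.List.insertBy b₂ x acc) acc := by
  intro xs
  induction xs with
  | nil => intro acc _ _; rfl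
  | cons x xs ih =>
    intro acc hxs hacc
    simp only [List.foldl_cons]
    rw [pv_insertBy_congr b₁ b₂ x acc
        (fun y hy => hb x y (hxs x (by simp)) (hacc y hy))]
    exact ih _ (fun z hz => hxs z (by simp [hz]))
      (fun y hy => ((PySem.List.mem_insertBy b₂ x y acc).mp hy).elim
        (fun he => he ▸ hxs x (by simp)) (fun he => hacc y he))

-- sorted2 with a key whose first component already separates the elements is sorted by that first key
theorem pv_sorted2_eq_sorted {α κ₁ κ₂ : Type} [LinearOrder κ₁] [LinearOrder κ₂]
    (xs : List α) (k1 : α → κ₁) (k2 : α → κ₂)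
    (h : ∀ a ∈ xs, ∀ c ∈ xs, k1 a = k1 c → a = c) :
    PySem.List.sorted2 xs k1 k2 = PySem.List.sorted xs k1 := by
  simp only [PySem.List.sorted2, PySem.List.sorted]
  exact pv_foldl_insertBy_congr _ _ (fun a => a ∈ xs)
    (by
      intro a c ha hc
      by_cases hk : k1 a = k1 c
      · have : a = c := h a ha c hc hk
        subst this
        simp
      · rcases lt_or_gt_of_ne hk with hlt | hgt
        · simp [hlt, not_lt_of_gt hlt]
        · simp [hgt, not_lt_of_gt hgt])
    xs [] (fun _ hx => hx) (by simp)

theorem pv_foldl_str_append {α : Type} (g : α → String) :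
    ∀ (l : List α) (a : String),
      l.foldl (fun s x => s ++ g x) a = a ++ l.foldl (fun s x => s ++ g x) "" := by
  intro l
  induction l with
  | nil => intro a; simp
  | cons x l ih =>
    intro a
    simp only [List.foldl_cons]
    rw [ih (a ++ g x), ih ("" ++ g x)]
    simp [String.append_assoc]

-- membership of the run heads
theorem pv_mem_pvKeys (L : List String) (k : String) : k ∈ pvKeys L ↔ k ∈ L := by
  induction L using pvKeys.induct with
  | case1 => simp [pvKeys]
  | case2 x rest ih =>
    rw [pvKeys]
    constructor
    · intro h
      rcases List.mem_cons.mp h with rfl | h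
      · exact List.mem_cons_self
      · have := ih.mp h
        exact List.mem_cons_of_mem _ ((List.dropWhile_sublist _).mem this)
    · intro h
      rcases List.mem_cons.mp h with rfl | h
      · exact List.mem_cons_self
      · rw [← List.takeWhile_append_dropWhile (p := fun y => y == x) (l := rest)] at h
        rcases List.mem_append.mp h with h | h
        · have h2 := List.mem_takeWhile_imp h
          simp only [beq_iff_eq] at h2
          simp [List.mem_cons, h2]
        · exact List.mem_cons_of_mem _ (ih.mpr h)

-- everything after the leading run of x is strictly greater than x
theorem pv_lt_of_mem_drop (x : String) (rest : List String)
    (h : (x :: rest).Pairwise (· ≤ ·)) :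
    ∀ y ∈ rest.dropWhile (fun y => y == x), x < y := by
  intro y hy
  have hdsub : (rest.dropWhile (fun y => y == x)).Sublist rest := List.dropWhile_sublist _
  cases hd : rest.dropWhile (fun y => y == x) with
  | nil => simp [hd] at hy
  | cons h1 t =>
    have hh1x : ¬ (h1 == x) = true := by
      have := List.head?_dropWhile_not (p := fun y => y == x) (l := rest)
      rw [hd] at this
      simpa using this
    have hh1mem : h1 ∈ rest := (hd ▸ hdsub).mem List.mem_cons_self
    have hxle : x ≤ h1 := (List.pairwise_cons.mp h).1 h1 hh1mem
    have hxlt : x < h1 := lt_of_le_of_ne hxle (fun he => hh1x (by simp [he]))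
    rw [hd] at hy
    rcases List.mem_cons.mp hy with rfl | hy
    · exact hxlt
    · have hp : (h1 :: t).Pairwise (· ≤ ·) :=
        List.Pairwise.sublist (hd ▸ hdsub) ((List.pairwise_cons.mp h).2)
      exact lt_of_lt_of_le hxlt ((List.pairwise_cons.mp hp).1 y hy)

-- on a ≤-sorted list the run heads are strictly increasing
theorem pv_pvKeys_pairwise_lt (L : List String) (h : L.Pairwise (· ≤ ·)) :
    (pvKeys L).Pairwise (· < ·) := by
  induction L using pvKeys.induct with
  | case1 => simp [pvKeys]
  | case2 x rest ih =>
    rw [pvKeys, List.pairwise_cons]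
    have hdrop := pv_lt_of_mem_drop x rest h
    refine ⟨fun y hy => hdrop y ((pv_mem_pvKeys _ y).mp hy), ih ?_⟩
    exact List.Pairwise.sublist (List.dropWhile_sublist _) ((List.pairwise_cons.mp h).2)

-- on a ≤-sorted list, pvRunLines emits one line per run head, with that head's count
theorem pv_pvRunLines_eq (L : List String) (h : L.Pairwise (· ≤ ·)) :
    pvRunLines L = (pvKeys L).foldl
      (fun s k => s ++ ("- " ++ pvTitle k ++ ": " ++ PySem.Int.toStr (L.count k : Int) ++ "\n")) "" := by
  induction L using pvKeys.induct with
  | case1 => simp [pvKeys, pvRunLines]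
  | case2 x rest ih =>
    have hsplit := List.takeWhile_append_dropWhile (p := fun y => y == x) (l := rest)
    have hdrop := pv_lt_of_mem_drop x rest h
    have hpdrop : (rest.dropWhile (fun y => y == x)).Pairwise (· ≤ ·) :=
      List.Pairwise.sublist (List.dropWhile_sublist _) ((List.pairwise_cons.mp h).2)
    -- the head's count in the whole list is the leading run length
    have hcount_take : (rest.takeWhile (fun y => y == x)).count x
        = (rest.takeWhile (fun y => y == x)).length := by
      rw [List.count_eq_length]
      intro y hy
      have h2 := List.mem_takeWhile_imp hy
      simp only [beq_iff_eq] at h2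
      simp [h2]
    have hcount_drop : (rest.dropWhile (fun y => y == x)).count x = 0 := by
      rw [List.count_eq_zero]
      intro hx
      exact absurd (hdrop x hx) (lt_irrefl x)
    have hrest : rest.count x = (rest.takeWhile (fun y => y == x)).length := by
      conv_lhs => rw [← hsplit]
      rw [List.count_append, hcount_take, hcount_drop]
      omega
    have hcx : (x :: rest).count x = 1 + (rest.takeWhile (fun y => y == x)).length := by
      rw [List.count_cons_self, hrest]
      omega
    -- later keys count only inside the dropped suffix
    have hck : ∀ k ∈ pvKeys (rest.dropWhile (fun y => y == x)),
        (x :: rest).count k = (rest.dropWhile (fun y => y == x)).count k := by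
      intro k hk
      have hkmem : k ∈ rest.dropWhile (fun y => y == x) := (pv_mem_pvKeys _ k).mp hk
      have hkx : x < k := hdrop k hkmem
      have hkne : k ≠ x := (ne_of_gt hkx)
      have hctake : (rest.takeWhile (fun y => y == x)).count k = 0 := by
        rw [List.count_eq_zero]
        intro hkt
        have h2 := List.mem_takeWhile_imp hkt
        simp only [beq_iff_eq] at h2
        exact hkne h2
      have h1 : List.count k (x :: rest) = List.count k rest := by
        simp [Ne.symm hkne]
      have h2 : List.count k rest
          = (rest.takeWhile (fun y => y == x)).count k + (rest.dropWhile (fun y => y == x)).count k := by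
        conv_lhs => rw [← hsplit]
        rw [List.count_append]
      rw [h1, h2, hctake]
      omega
    have hcongr : ∀ init : String, (pvKeys (rest.dropWhile (fun y => y == x))).foldl
        (fun s k => s ++ ("- " ++ pvTitle k ++ ": " ++ PySem.Int.toStr ((x :: rest).count k : Int) ++ "\n")) init
      = (pvKeys (rest.dropWhile (fun y => y == x))).foldl
        (fun s k => s ++ ("- " ++ pvTitle k ++ ": " ++ PySem.Int.toStr ((rest.dropWhile (fun y => y == x)).count k : Int) ++ "\n")) init := by
      intro init
      exact PySem.List.foldl_congr_mem _ _ _ _ (fun acc k hk => by rw [hck k hk])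
    rw [pvRunLines, pvKeys, List.foldl_cons, ih hpdrop, hcongr]
    conv_rhs => rw [pv_foldl_str_append]
    simp [hcx, String.append_assoc]

-- the run heads of sorted(xs) are exactly sorted(set(xs))
theorem pv_pvKeys_sorted (xs : List String) :
    pvKeys (PySem.List.sorted xs (fun x => x)) = PySem.List.sorted (PySem.Set.ofList xs) (fun x => x) := by
  have hpair : (PySem.List.sorted xs (fun x => x)).Pairwise (· ≤ ·) :=
    PySem.List.sorted_pairwise xs (fun x => x)
  have hlt := pv_pvKeys_pairwise_lt _ hpair
  have hnd : (pvKeys (PySem.List.sorted xs (fun x => x))).Nodup := hlt.imp ne_of_lt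
  have hperm : (pvKeys (PySem.List.sorted xs (fun x => x))).Perm (PySem.Set.ofList xs) := by
    rw [List.perm_ext_iff_of_nodup hnd (PySem.Set.nodup_ofList xs)]
    intro a
    rw [pv_mem_pvKeys, PySem.List.mem_sorted, PySem.Set.mem_ofList]
  exact (PySem.List.sorted_eq_of_perm_of_pairwise_lt _ _ (fun x => x) hperm hlt).symm

-- ===== VERDICT (by name: the statement is the Claim_ definition above) =====
theorem generate_error_summary_py_spec : Claim_equal_generate_error_summary_py := by
  intro errors _
  unfold Spec_generate_error_summary_py generate_error_summary_py generate_error_summary_py_alt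
  by_cases h : errors = []
  · simp [h]
  · simp only [if_neg h]
    have hdict : errors.foldl (fun d error =>
        (d : PySem.Dict String Int).insert ((PySem.Dict.mk error).getD "severity" "unknown")
          (d.getD ((PySem.Dict.mk error).getD "severity" "unknown") 0 + 1)) PySem.Dict.empty
        = PySem.Dict.counter (errors.map (fun error => (PySem.Dict.mk error).getD "severity" "unknown")) := by
      rw [← PySem.Dict.foldl_insert_getD_add_one_eq_counter, List.foldl_map]
    set xs := errors.map (fun error => (PySem.Dict.mk error).getD "severity" "unknown") with hxs
    have hsorted : PySem.List.sorted2 (PySem.Dict.counter xs).items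
        (fun p => p.1) (fun p => p.2)
        = (PySem.List.sorted (PySem.Set.ofList xs) (fun x => x)).map
            (fun k => (k, (List.count k xs : Int))) := by
      rw [PySem.Dict.items_counter]
      rw [pv_sorted2_eq_sorted _ _ _ (by
        intro a ha c hc hk
        simp only [List.mem_map] at ha hc
        obtain ⟨ka, _, rfl⟩ := ha
        obtain ⟨kc, _, rfl⟩ := hc
        simp_all)]
      apply PySem.List.sorted_eq_of_perm_of_pairwise_lt
      · exact (PySem.List.sorted_perm _ _ _).map _
      · exact List.Pairwise.map _ (fun a b hab => hab) (PySem.List.sorted_ofList_pairwise_lt xs)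
    -- B side: run-length scan over sorted(xs) = per-key lines with counts in xs
    have hB : pvRunLines (PySem.List.sorted xs (fun x => x))
        = (PySem.List.sorted (PySem.Set.ofList xs) (fun x => x)).foldl
          (fun s k => s ++ ("- " ++ pvTitle k ++ ": " ++ PySem.Int.toStr (xs.count k : Int) ++ "\n")) "" := by
      rw [pv_pvRunLines_eq _ (PySem.List.sorted_pairwise xs (fun x => x)), pv_pvKeys_sorted]
      apply PySem.List.foldl_congr_mem
      intro acc k _
      rw [List.Perm.count_eq (PySem.List.sorted_perm xs (fun x => x) false)]
    simp only [hdict, hsorted, List.foldl_map, hB]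
    have hbody : ∀ (L : List String) (a : String),
        L.foldl (fun s p => s ++ "- " ++ pvTitle p ++ ": " ++ PySem.Int.toStr (List.count p xs : Int) ++ "\n") a
        = L.foldl (fun s p => s ++ ("- " ++ pvTitle p ++ ": " ++ PySem.Int.toStr (List.count p xs : Int) ++ "\n")) a := by
      intro L a
      simp only [String.append_assoc]
    rw [hbody, pv_foldl_str_append]
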